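-- pv_equiv track=rewrite | github.com/biesnecker/aoc-anyhow | 202501.py | partOne
-- ===== SOURCE A (Python) =====
-- from typing import Tuple
--
-- def partOne(input: list[Tuple[str, int]]) -> int:
--     res = 0
--     pos = 50
--     for row in input:
--         match row:
--             case ("L", amt):
--                 pos = (pos - amt) % 100
--             case ("R", amt):
--                 pos = (pos + amt) % 100
--             case _:
--                 raise Exception(f"Invalid input: {row}")
--         if pos == 0:
--             res += 1
--     return res
-- ===== SOURCE B (Python) =====
-- from itertools import accumulate
--
-- def partOne(input):
--     deltas = []
--     for row in input:
--         match row: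
--             case ("L", amt):
--                 deltas.append(-amt)
--             case ("R", amt):
--                 deltas.append(amt)
--             case _:
--                 raise Exception(f"Invalid input: {row}")
--     totals = list(accumulate(deltas, initial=50))
--     return sum(1 for t in totals[1:] if t % 100 == 0)
-- ===== Notes on version B (the rewrite author's own statement) =====
-- stated objective: alternative
-- what changed: Replaces the interleaved update-and-test loop (pos re-reduced mod 100 each step) with a map-to-signed-deltas -> itertools.accumulate prefix-sum -> count pipeline, using that the running mod-100 position is zero exactly when the raw prefix sum is divisible by 100.
import Mathlib
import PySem

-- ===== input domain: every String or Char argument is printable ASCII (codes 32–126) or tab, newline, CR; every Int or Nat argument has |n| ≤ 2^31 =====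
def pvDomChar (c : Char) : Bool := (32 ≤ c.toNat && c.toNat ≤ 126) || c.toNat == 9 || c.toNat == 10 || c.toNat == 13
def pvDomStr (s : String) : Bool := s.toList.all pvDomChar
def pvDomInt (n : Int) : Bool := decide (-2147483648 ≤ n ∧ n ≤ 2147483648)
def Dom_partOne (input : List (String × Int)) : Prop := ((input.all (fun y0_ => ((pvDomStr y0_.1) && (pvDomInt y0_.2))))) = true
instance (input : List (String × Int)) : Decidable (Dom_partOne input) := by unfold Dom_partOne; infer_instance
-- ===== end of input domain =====

-- B trades the interleaved update-and-test loop for a map→prefix-sum→count pipeline; same O(n) cost.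

-- ===== PORT A =====
-- A's for-loop over rows carrying (res, pos); the invalid-row branch raises, modelled as none
-- (those inputs are excluded by Pre_partOne; the final .getD 0 is never reached on Pre_).
def partOneLoop : List (String × Int) → Int → Int → Option Int
  | [], res, _ => some res
  | (d, amt) :: rest, res, pos =>
    if d = "L" then
      let p := PySem.Int.mod (pos - amt) 100
      partOneLoop rest (if p = 0 then res + 1 else res) p
    else if d = "R" then
      let p := PySem.Int.mod (pos + amt) 100
      partOneLoop rest (if p = 0 then res + 1 else res) p
    else none

def partOne (input : List (String × Int)) : Int :=
  (partOneLoop input 0 50).getD 0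

-- ===== PORT B =====
-- row ↦ signed delta (none = the raise branch)
def pvDelta (row : String × Int) : Option Int :=
  if row.1 = "L" then some (-row.2)
  else if row.1 = "R" then some row.2
  else none

-- accumulate(deltas, initial=50) = List.scanl; count the tail's multiples of 100
def partOne_alt (input : List (String × Int)) : Int :=
  match input.mapM pvDelta with
  | none => 0
  | some deltas =>
    (((deltas.scanl (· + ·) 50).tail).countP (fun t => PySem.Int.mod t 100 == 0) : Int)

-- ===== PRECONDITION & SPEC =====
-- Pre_ excludes exactly the rows on which A raises Exception (direction not "L"/"R")
def Pre_partOne (input : List (String × Int)) : Prop :=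
  ∀ row ∈ input, row.1 = "L" ∨ row.1 = "R"
instance (input : List (String × Int)) : Decidable (Pre_partOne input) := by
  unfold Pre_partOne; infer_instance

def pvWitness_partOne : (List (String × Int)) := [("R", 50), ("L", 30), ("R", 80)]

def Spec_partOne (input : List (String × Int)) (out : Int) : Prop := out = partOne_alt input
instance (input : List (String × Int)) (out : Int) : Decidable (Spec_partOne input out) := by unfold Spec_partOne; infer_instance

-- ===== CLAIM (what is proved, stated in full; the proofs are below) =====
def Claim_equal_partOne : Prop := ∀ (input : List (String × Int)), Dom_partOne input → Pre_partOne input → Spec_partOne input (partOne input)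

-- ===== LEMMAS AND PROOFS =====

theorem pvMod100_add (s a : Int) :
    PySem.Int.mod (PySem.Int.mod s 100 + a) 100 = PySem.Int.mod (s + a) 100 := by
  rw [PySem.Int.mod_eq_emod_of_pos (by norm_num), PySem.Int.mod_eq_emod_of_pos (by norm_num),
      PySem.Int.mod_eq_emod_of_pos (by norm_num), Int.add_emod, Int.emod_emod_of_dvd _ (by norm_num),
      ← Int.add_emod]

theorem pvMod100_sub (s a : Int) :
    PySem.Int.mod (PySem.Int.mod s 100 - a) 100 = PySem.Int.mod (s - a) 100 := by
  have := pvMod100_add s (-a)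
  simpa [sub_eq_add_neg] using this

theorem pvScanl_head {f : Int → Int → Int} (b : Int) (l : List Int) :
    List.scanl f b l = b :: (List.scanl f b l).tail := by
  cases l <;> simp

-- loop invariant: pos is the running sum s reduced mod 100
theorem partOneLoop_eq (l : List (String × Int)) (ds : List Int) (res s : Int)
    (h : l.mapM pvDelta = some ds) :
    partOneLoop l res (PySem.Int.mod s 100) =
      some (res + (((ds.scanl (· + ·) s).tail).countP (fun t => PySem.Int.mod t 100 == 0) : Int)) := by
  induction l generalizing ds res s with
  | nil =>
    simp_all [List.mapM, partOneLoop]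
    cases h; simp [List.scanl]
  | cons row rest ih =>
    obtain ⟨d, amt⟩ := row
    rcases hd : pvDelta (d, amt) with _ | δ
    · simp [List.mapM_cons, hd] at h
    · rcases h' : rest.mapM pvDelta with _ | ds'
      · simp [List.mapM_cons, hd, h'] at h
      · simp [List.mapM_cons, hd, h'] at h
        subst h
        simp only [pvDelta] at hd
        have step : ∀ p : Int, p = PySem.Int.mod (s + δ) 100 →
            partOneLoop rest (if p = 0 then res + 1 else res) p =
              some (res + ((((δ :: ds').scanl (· + ·) s).tail).countP
                (fun t => PySem.Int.mod t 100 == 0) : Int)) := by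
          intro p hp
          subst hp
          rw [ih ds' _ (s + δ) h']
          rw [List.scanl_cons, List.tail_cons, pvScanl_head (b := s + δ) (l := ds'),
              List.countP_cons, List.tail_cons]
          by_cases h0 : (100 : Int) ∣ s + δ <;>
            simp [h0, PySem.Int.mod_eq_zero_iff_dvd] <;> push_cast <;> ring
        by_cases hL : d = "L"
        · obtain rfl : -amt = δ := by simpa [hL] using hd
          simp only [partOneLoop, hL, if_pos rfl]
          exact step _ (by rw [pvMod100_sub, ← sub_eq_add_neg])
        · by_cases hR : d = "R"
          · obtain rfl : amt = δ := by simpa [hL, hR] using hd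
            simp only [partOneLoop, hR, if_neg hL]
            exact step _ (pvMod100_add s amt)
          · simp [hL, hR] at hd

theorem pre_mapM (input : List (String × Int)) (h : Pre_partOne input) :
    ∃ ds, input.mapM pvDelta = some ds := by
  induction input with
  | nil => exact ⟨[], rfl⟩
  | cons row rest ih =>
    obtain ⟨ds, hds⟩ := ih (fun r hr => h r (List.mem_cons_of_mem _ hr))
    rcases h row List.mem_cons_self with hL | hR
    · exact ⟨-row.2 :: ds, by simp [List.mapM_cons, pvDelta, hL, hds]⟩
    · exact ⟨row.2 :: ds, by simp [List.mapM_cons, pvDelta, hR, hds]⟩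

-- ===== VERDICT (by name: the statement is the Claim_ definition above) =====
theorem partOne_spec : Claim_equal_partOne := by
  intro input _ hpre
  obtain ⟨ds, hds⟩ := pre_mapM input hpre
  unfold Spec_partOne partOne partOne_alt
  rw [hds]
  have h50 : (50 : Int) = PySem.Int.mod 50 100 := by decide
  rw [h50, partOneLoop_eq input ds 0 50 hds]
  simp
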